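-- pv_equiv track=rewrite | github.com/patkarlab/sci-L3-target-seq-primer-designer | scripts/run.py | fragment_sequences
-- ===== SOURCE A (Python) =====
-- import math
--
-- fragment_size_max=200
--
-- def fragment_sequences(record_sequence):
-- 	fragment_size=201
-- 	fragments=[]
-- 	i=1
-- 	pos=0
-- 	seq_length = len(record_sequence)
-- 	while (fragment_size > fragment_size_max):
-- 		fragment_size = math.ceil(seq_length/i)
-- 		i+=1
-- 		if (fragment_size < fragment_size_max):
-- 			break
-- 	while pos < len(record_sequence):
-- 		fragments.append(record_sequence[pos:pos+fragment_size])
-- 		pos += fragment_size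
-- 	return fragments
-- ===== SOURCE B (Python) =====
-- import math
--
-- fragment_size_max = 200
--
-- def fragment_sequences(record_sequence):
--     seq_length = len(record_sequence)
--     if seq_length == 0:
--         return []
--     # closed form: smallest number of fragments whose size fits under the cap
--     n_fragments = max(1, math.ceil(seq_length / fragment_size_max))
--     fragment_size = math.ceil(seq_length / n_fragments)
--     return [record_sequence[pos:pos + fragment_size]
--             for pos in range(0, seq_length, fragment_size)]
-- ===== Notes on version B (the rewrite author's own statement) =====
-- stated objective: simpler
-- what changed: A's search loop that tries i=1,2,... until ceil(len/i) fits under the 200 cap is replaced by the closed form n_fragments = max(1, ceil(len/200)), fragment_size = ceil(len/n_fragments), and the slicing while-loop becomes a comprehension over range(0, len, fragment_size).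
import Mathlib
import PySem

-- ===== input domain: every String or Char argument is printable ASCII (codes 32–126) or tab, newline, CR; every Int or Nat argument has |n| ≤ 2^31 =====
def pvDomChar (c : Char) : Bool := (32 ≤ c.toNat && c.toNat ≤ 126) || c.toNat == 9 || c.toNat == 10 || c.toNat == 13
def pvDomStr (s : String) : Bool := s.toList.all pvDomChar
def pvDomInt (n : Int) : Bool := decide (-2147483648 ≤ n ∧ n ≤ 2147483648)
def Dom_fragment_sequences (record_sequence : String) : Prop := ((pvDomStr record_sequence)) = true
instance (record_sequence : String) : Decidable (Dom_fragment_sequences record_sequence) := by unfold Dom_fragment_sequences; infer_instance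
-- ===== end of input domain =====

-- B replaces A's linear search for the fragment count by a closed form (simpler); return values proved equal.

-- math.ceil(a/b) for nonnegative a and positive b; exact on the admitted lengths
-- (< 2^52), where CPython's float division followed by ceil equals integer ceiling.
def pyCeilDiv (a b : Int) : Int := -(PySem.Int.floordiv (-a) b)

def fragment_size_max : Int := 200

-- ===== PORT A =====
-- first while loop of A: state (fragment_size, i); the fuel is a totality guard only,
-- proved sufficient below (the Python loop always terminates after at most ceil(len/200) steps)
def fragSizeLoop (seq_length : Int) : Nat → Int → Int → Int
  | 0, fragment_size, _ => fragment_size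
  | fuel + 1, fragment_size, i =>
      if fragment_size > fragment_size_max then
        let fragment_size' := pyCeilDiv seq_length i
        if fragment_size' < fragment_size_max then fragment_size'
        else fragSizeLoop seq_length fuel fragment_size' (i + 1)
      else fragment_size

-- second while loop of A; '0 < fragment_size' is a totality guard: Python diverges there,
-- but the loop body is only ever entered with a positive fragment_size (proved below)
def buildLoop (cs : List Char) (fragment_size : Int) (pos : Int) : List String :=
  if _h : pos < (cs.length : Int) ∧ 0 < fragment_size then
    String.ofList (PySem.List.slice cs (some pos) (some (pos + fragment_size)))
      :: buildLoop cs fragment_size (pos + fragment_size)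
  else []
termination_by ((cs.length : Int) - pos).toNat
decreasing_by omega

def fragment_sequences (record_sequence : String) : List String :=
  let cs := record_sequence.toList
  let seq_length : Int := cs.length
  let fragment_size := fragSizeLoop seq_length (seq_length.toNat + 2) 201 1
  buildLoop cs fragment_size 0

-- ===== PORT B =====
def fragment_sequences_alt (record_sequence : String) : List String :=
  let cs := record_sequence.toList
  let seq_length : Int := cs.length
  if seq_length = 0 then []
  else
    let n_fragments := max 1 (pyCeilDiv seq_length fragment_size_max)
    let fragment_size := pyCeilDiv seq_length n_fragments
    (PySem.List.pyRange 0 seq_length fragment_size).map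
      (fun pos => String.ofList (PySem.List.slice cs (some pos) (some (pos + fragment_size))))

-- ===== PRECONDITION & SPEC =====
def Spec_fragment_sequences (record_sequence : String) (out : List String) : Prop := out = fragment_sequences_alt record_sequence
instance (record_sequence : String) (out : List String) : Decidable (Spec_fragment_sequences record_sequence out) := by unfold Spec_fragment_sequences; infer_instance

-- ===== CLAIM (what is proved, stated in full; the proofs are below) =====
def Claim_equal_fragment_sequences : Prop := ∀ (record_sequence : String), Dom_fragment_sequences record_sequence → Spec_fragment_sequences record_sequence (fragment_sequences record_sequence)

-- ===== LEMMAS AND PROOFS =====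

theorem pyCeilDiv_le_iff {a b m : Int} (hb : 0 < b) : pyCeilDiv a b ≤ m ↔ a ≤ m * b := by
  unfold pyCeilDiv
  rw [neg_le, PySem.Int.le_floordiv_iff_mul_le hb, neg_mul]
  constructor <;> intro h <;> linarith

theorem lt_pyCeilDiv_iff {a b m : Int} (hb : 0 < b) : m < pyCeilDiv a b ↔ m * b < a := by
  unfold pyCeilDiv
  rw [lt_neg, PySem.Int.floordiv_lt_iff_lt_mul hb, neg_mul]
  constructor <;> intro h <;> linarith

theorem fragSizeLoop_of_le (L : Int) (fuel : Nat) (fs i : Int) (h : ¬ fs > fragment_size_max) :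
    fragSizeLoop L fuel fs i = fs := by
  cases fuel <;> simp [fragSizeLoop, h]

theorem fragSizeLoop_eq (L : Int) (hL : 0 < L) :
    ∀ (fuel : Nat) (i fs : Int), 1 ≤ i → i ≤ max 1 (pyCeilDiv L 200) → 200 < fs →
      (max 1 (pyCeilDiv L 200) - i).toNat < fuel →
      fragSizeLoop L fuel fs i = pyCeilDiv L (max 1 (pyCeilDiv L 200)) := by
  intro fuel
  induction fuel with
  | zero => intro i fs _ _ _ hlt; omega
  | succ n ih =>
    intro i fs hi1 hile hfs hfuel
    have himin : (1 : Int) ≤ max 1 (pyCeilDiv L 200) := le_max_left _ _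
    show fragSizeLoop L (n+1) fs i = _
    rw [fragSizeLoop]
    rw [if_pos (by simpa [fragment_size_max] using hfs)]
    rcases eq_or_lt_of_le hile with heq | hlt
    · -- i is the stopping index: ceil(L/i) ≤ 200
      have hle200 : pyCeilDiv L i ≤ 200 := by
        rw [pyCeilDiv_le_iff (by omega : (0:Int) < i)]
        by_cases hc : pyCeilDiv L 200 ≤ 1
        · -- max is 1, so L ≤ 200
          have : ¬ ((1:Int) < pyCeilDiv L 200) := by omega
          rw [lt_pyCeilDiv_iff (by norm_num : (0:Int) < 200)] at this
          have : L ≤ 200 := by omega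
          have hi : i = 1 := by omega
          rw [hi]; omega
        · have hc' : 1 < pyCeilDiv L 200 := by omega
          have hmax : max 1 (pyCeilDiv L 200) = pyCeilDiv L 200 := by omega
          have hLle : L ≤ pyCeilDiv L 200 * 200 :=
            (pyCeilDiv_le_iff (by norm_num : (0:Int) < 200)).mp le_rfl
          rw [heq, hmax]
          calc L ≤ pyCeilDiv L 200 * 200 := hLle
            _ = 200 * pyCeilDiv L 200 := by ring
      by_cases hbr : pyCeilDiv L i < fragment_size_max
      · rw [if_pos hbr, heq]
      · rw [if_neg hbr]
        rw [fragSizeLoop_of_le L n _ (i+1) (by simp [fragment_size_max]; omega)]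
        rw [heq]
    · -- i below the stopping index: ceil(L/i) > 200, keep looping
      have hmax : max 1 (pyCeilDiv L 200) = pyCeilDiv L 200 := by omega
      have hiltc : i < pyCeilDiv L 200 := by omega
      have h200i : 200 * i < L := by
        have : ¬ (pyCeilDiv L 200 ≤ i) := by omega
        rw [pyCeilDiv_le_iff (by norm_num : (0:Int) < 200)] at this
        omega
      have hgt : 200 < pyCeilDiv L i := by
        rw [lt_pyCeilDiv_iff (by omega : (0:Int) < i)]
        calc 200 * i = 200 * i := rfl
          _ < L := h200i
      rw [if_neg (by simp [fragment_size_max]; omega)]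
      exact ih (i+1) _ (by omega) (by omega) hgt (by omega)

theorem pyRange_pos_eq_nil {a b s : Int} (hs : 0 < s) (hab : ¬ a < b) :
    PySem.List.pyRange a b s = [] := by
  rw [PySem.List.pyRange_of_pos a b hs, if_neg hab]
  simp

theorem pyRange_pos_cons {a b s : Int} (hs : 0 < s) (hab : a < b) :
    PySem.List.pyRange a b s = a :: PySem.List.pyRange (a + s) b s := by
  rw [PySem.List.pyRange_of_pos a b hs, PySem.List.pyRange_of_pos (a+s) b hs,
    if_pos hab]
  have hq0 : 0 ≤ (b - a - 1) / s := Int.ediv_nonneg (by omega) (by omega)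
  have hN : b - a + s - 1 = (b - a - 1) + 1 * s := by ring
  rw [hN, Int.add_mul_ediv_right _ _ (by omega : s ≠ 0)]
  have hNnat : ((b - a - 1) / s + 1).toNat = ((b - a - 1) / s).toNat + 1 := by omega
  rw [hNnat, List.range_succ_eq_map, List.map_cons, List.map_map]
  by_cases h2 : a + s < b
  · rw [if_pos h2]
    have : b - (a + s) + s - 1 = b - a - 1 := by ring
    rw [this]
    congr 1
    · simp
    · apply List.map_congr_left
      intro k _
      simp [Function.comp]
      ring
  · rw [if_neg h2]
    -- last fragment: b ≤ a + s, so the count is exactly 1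
    have hd1 : 0 ≤ b - a - 1 := by omega
    have hd2 : b - a - 1 < s := by omega
    rw [Int.ediv_eq_zero_of_lt hd1 hd2]
    simp

theorem buildLoop_eq (cs : List Char) (fs : Int) (hfs : 0 < fs) :
    ∀ (n : Nat) (pos : Int), 0 ≤ pos → (((cs.length : Int)) - pos).toNat ≤ n →
      buildLoop cs fs pos = (PySem.List.pyRange pos (cs.length : Int) fs).map
        (fun p => String.ofList (PySem.List.slice cs (some p) (some (p + fs)))) := by
  intro n
  induction n with
  | zero =>
    intro pos hpos hn
    rw [buildLoop, dif_neg (by omega), pyRange_pos_eq_nil hfs (by omega)]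
    simp
  | succ n ih =>
    intro pos hpos hn
    by_cases h : pos < (cs.length : Int)
    · rw [buildLoop, dif_pos ⟨h, hfs⟩, pyRange_pos_cons hfs h, List.map_cons,
        ih (pos + fs) (by omega) (by omega)]
    · rw [buildLoop, dif_neg (by omega), pyRange_pos_eq_nil hfs h]
      simp

theorem fragment_sequences_key (cs : List Char) :
    buildLoop cs (fragSizeLoop (cs.length : Int) (((cs.length : Int)).toNat + 2) 201 1) 0
      = if (cs.length : Int) = 0 then [] else
          (PySem.List.pyRange 0 (cs.length : Int)
              (pyCeilDiv (cs.length : Int) (max 1 (pyCeilDiv (cs.length : Int) fragment_size_max)))).map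
            (fun pos => String.ofList (PySem.List.slice cs (some pos)
              (some (pos + pyCeilDiv (cs.length : Int) (max 1 (pyCeilDiv (cs.length : Int) fragment_size_max)))))) := by
  set L : Int := (cs.length : Int) with hL
  by_cases h0 : L = 0
  · rw [if_pos h0, buildLoop, dif_neg (by omega)]
  · have hLpos : 0 < L := by omega
    rw [if_neg h0]
    have hfrag : fragSizeLoop L (L.toNat + 2) 201 1 = pyCeilDiv L (max 1 (pyCeilDiv L 200)) := by
      apply fragSizeLoop_eq L hLpos
      · omega
      · exact le_max_left _ _
      · norm_num
      · have hceilL : pyCeilDiv L 200 ≤ L := by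
          rw [pyCeilDiv_le_iff (by norm_num : (0:Int) < 200)]; omega
        omega
    have hmax : fragment_size_max = (200 : Int) := rfl
    rw [hmax, hfrag]
    have hfs : 0 < pyCeilDiv L (max 1 (pyCeilDiv L 200)) := by
      rw [lt_pyCeilDiv_iff (by positivity)]
      simpa using hLpos
    rw [buildLoop_eq cs _ hfs L.toNat 0 le_rfl (by omega)]

-- ===== VERDICT (by name: the statement is the Claim_ definition above) =====
theorem fragment_sequences_spec : Claim_equal_fragment_sequences := by
  intro s _
  unfold Spec_fragment_sequences fragment_sequences fragment_sequences_alt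
  exact fragment_sequences_key s.toList
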